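-- pv_equiv track=rewrite | github.com/ccdxc/sw | iota/genpolicy.py | generate_ip_list
-- ===== SOURCE A (Python) =====
-- def get_ip_addr(a, b, c):
--     return str(a) + "." + str(b) + "." + str(c) + ".0/24"
--
-- def generate_ip_list(count):
--     gen_count = 0
--     ip_list = []
--     a = 1
--     b = 0
--     c = 0
--
--     while(gen_count < count):
--         ip_list.append(get_ip_addr(a, b, c))
--         c = c + 1
--         if (c == 128):
--             c = 0
--             b = b + 1
--             if ( b == 128):
--                 b = 0
--                 a = a + 1
--
--         gen_count = gen_count + 1
--
--     return ip_list
-- ===== SOURCE B (Python) =====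
-- def get_ip_addr(a, b, c):
--     return str(a) + "." + str(b) + "." + str(c) + ".0/24"
--
-- def generate_ip_list(count):
--     return [get_ip_addr(1 + i // 16384, (i // 128) % 128, i % 128)
--             for i in range(count)]
-- ===== Notes on version B (the rewrite author's own statement) =====
-- stated objective: simpler
-- what changed: Replaces the incremental carry-counter loop (c/b/a with ==128 carry branches) by a direct closed form computing each octet from the index via division and modulo, mapped over range(count).
import Mathlib
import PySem

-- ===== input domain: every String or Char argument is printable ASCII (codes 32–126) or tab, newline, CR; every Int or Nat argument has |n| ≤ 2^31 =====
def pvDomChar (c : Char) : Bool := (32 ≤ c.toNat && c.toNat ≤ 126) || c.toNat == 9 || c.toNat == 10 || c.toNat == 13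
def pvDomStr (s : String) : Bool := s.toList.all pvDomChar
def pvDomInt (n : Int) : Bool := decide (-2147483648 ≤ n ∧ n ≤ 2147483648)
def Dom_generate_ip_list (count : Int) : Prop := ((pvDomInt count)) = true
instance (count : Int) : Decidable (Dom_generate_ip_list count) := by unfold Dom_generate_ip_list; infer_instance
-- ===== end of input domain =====

-- B replaces A's incremental carry counters (c/b/a with ==128 carry branches) by a
-- closed form computing each octet from the index with // and %; objective: simpler.

-- ===== PORT A =====
def get_ip_addr (a b c : Int) : String :=
  PySem.Int.toStr a ++ "." ++ PySem.Int.toStr b ++ "." ++ PySem.Int.toStr c ++ ".0/24"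

-- the while loop of A, state (gen_count, a, b, c, ip_list)
def genLoopA (count gen_count a b c : Int) (ip_list : List String) : List String :=
  if gen_count < count then
    let ip_list' := ip_list ++ [get_ip_addr a b c]
    let c' := c + 1
    if c' = 128 then
      let b' := b + 1
      if b' = 128 then genLoopA count (gen_count + 1) (a + 1) 0 0 ip_list'
      else genLoopA count (gen_count + 1) a b' 0 ip_list'
    else genLoopA count (gen_count + 1) a b c' ip_list'
  else ip_list
termination_by (count - gen_count).toNat
decreasing_by all_goals omega

def generate_ip_list (count : Int) : List String := genLoopA count 0 1 0 0 []

-- ===== PORT B =====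
def get_ip_addr_alt (a b c : Int) : String :=
  PySem.Int.toStr a ++ "." ++ PySem.Int.toStr b ++ "." ++ PySem.Int.toStr c ++ ".0/24"

def generate_ip_list_alt (count : Int) : List String :=
  (PySem.List.pyRange 0 count 1).map (fun i =>
    get_ip_addr_alt (1 + PySem.Int.floordiv i 16384)
      (PySem.Int.mod (PySem.Int.floordiv i 128) 128)
      (PySem.Int.mod i 128))

-- ===== PRECONDITION & SPEC =====
def Spec_generate_ip_list (count : Int) (out : List String) : Prop := out = generate_ip_list_alt count
instance (count : Int) (out : List String) : Decidable (Spec_generate_ip_list count out) := by unfold Spec_generate_ip_list; infer_instance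

-- ===== CLAIM (what is proved, stated in full; the proofs are below) =====
def Claim_equal_generate_ip_list : Prop := ∀ (count : Int), Dom_generate_ip_list count → Spec_generate_ip_list count (generate_ip_list count)

-- ===== LEMMAS AND PROOFS =====

-- loop invariant: from index g ≥ 0 with counters in closed form, the loop appends exactly
-- the closed-form strings for indices g, g+1, …, count-1
theorem genLoopA_inv (count : Int) : ∀ (n : Nat) (g : Int) (acc : List String),
    0 ≤ g → (count - g).toNat = n →
    genLoopA count g (1 + g / 16384) (g / 128 % 128) (g % 128) acc
      = acc ++ (PySem.List.pyRange g count 1).map (fun i =>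
          get_ip_addr_alt (1 + i / 16384) (i / 128 % 128) (i % 128)) := by
  intro n
  induction n with
  | zero =>
    intro g acc hg hn
    have hge : count ≤ g := by omega
    rw [genLoopA, PySem.List.pyRange_one_eq_nil hge]
    simp [get_ip_addr_alt, show ¬ g < count by omega]
  | succ n ih =>
    intro g acc hg hn
    have hlt : g < count := by omega
    rw [genLoopA, PySem.List.pyRange_one_cons hlt]
    simp only [if_pos hlt, List.map_cons]
    have harg : get_ip_addr (1 + g / 16384) (g / 128 % 128) (g % 128)
        = get_ip_addr_alt (1 + g / 16384) (g / 128 % 128) (g % 128) := rfl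
    split_ifs with hc hb
    · have e1 : (1 + g / 16384) + 1 = 1 + (g + 1) / 16384 := by omega
      have e2 : (0 : Int) = (g + 1) / 128 % 128 := by omega
      have e3 : (0 : Int) = (g + 1) % 128 := by omega
      rw [harg,
        show genLoopA count (g + 1) (1 + g / 16384 + 1) 0 0
            = genLoopA count (g + 1) (1 + (g + 1) / 16384) ((g + 1) / 128 % 128) ((g + 1) % 128)
          from by rw [e1, ← e2, ← e3],
        ih (g + 1) _ (by omega) (by omega)]
      simp
    · have e1 : 1 + g / 16384 = 1 + (g + 1) / 16384 := by omega
      have e2 : g / 128 % 128 + 1 = (g + 1) / 128 % 128 := by omega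
      have e3 : (0 : Int) = (g + 1) % 128 := by omega
      rw [harg,
        show genLoopA count (g + 1) (1 + g / 16384) (g / 128 % 128 + 1) 0
            = genLoopA count (g + 1) (1 + (g + 1) / 16384) ((g + 1) / 128 % 128) ((g + 1) % 128)
          from by rw [e1, e2, ← e3],
        ih (g + 1) _ (by omega) (by omega)]
      simp
    · have e1 : 1 + g / 16384 = 1 + (g + 1) / 16384 := by omega
      have e2 : g / 128 % 128 = (g + 1) / 128 % 128 := by omega
      have e3 : g % 128 + 1 = (g + 1) % 128 := by omega
      rw [harg,
        show genLoopA count (g + 1) (1 + g / 16384) (g / 128 % 128) (g % 128 + 1)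
            = genLoopA count (g + 1) (1 + (g + 1) / 16384) ((g + 1) / 128 % 128) ((g + 1) % 128)
          from by rw [e1, e2, e3],
        ih (g + 1) _ (by omega) (by omega)]
      simp

-- B's floordiv/mod agree with Euclidean /,% on the nonnegative indices of range(count)
theorem alt_eq_closed (count : Int) :
    generate_ip_list_alt count
      = (PySem.List.pyRange 0 count 1).map (fun i =>
          get_ip_addr_alt (1 + i / 16384) (i / 128 % 128) (i % 128)) := by
  unfold generate_ip_list_alt
  apply List.map_congr_left
  intro i hi
  have h0 : 0 ≤ i := ((PySem.List.mem_pyRange_one).1 hi).1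
  rw [PySem.Int.floordiv_eq_ediv_of_pos (by norm_num : (0:Int) < 16384),
      PySem.Int.floordiv_eq_ediv_of_pos (by norm_num : (0:Int) < 128),
      PySem.Int.mod_eq_emod_of_pos (by norm_num : (0:Int) < 128),
      PySem.Int.mod_eq_emod_of_pos (by norm_num : (0:Int) < 128)]

-- ===== VERDICT (by name: the statement is the Claim_ definition above) =====
theorem generate_ip_list_spec : Claim_equal_generate_ip_list := by
  intro count _
  unfold Spec_generate_ip_list generate_ip_list
  rw [alt_eq_closed]
  have := genLoopA_inv count (count - 0).toNat 0 [] (by omega) rfl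
  simpa using this
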